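-- pv_equiv track=rewrite | github.com/noraworld/github-to-note | main.py | normalize_image_keys
-- ===== SOURCE A (Python) =====
-- def normalize_image_keys(keys):
--     """editor互換性のため key の表現ゆれを吸収"""
--     normalized = []
--     for key in keys:
--         if not key:
--             continue
--         k = key.strip()
--         if not k:
--             continue
--         normalized.append(k)
--         # img/123.jpg -> 123.jpg の形も併記
--         if "/" in k:
--             normalized.append(k.split("/")[-1])
--     return list(dict.fromkeys(normalized))
-- ===== SOURCE B (Python) =====
-- def normalize_image_keys(keys):
--     """editor互換性のため key の表現ゆれを吸収 (expand to candidates, then filter-based nub)"""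
--     def candidates(key):
--         if not key:
--             return []
--         k = key.strip()
--         if not k:
--             return []
--         return [k, k.split("/")[-1]] if "/" in k else [k]
--
--     xs = [x for key in keys for x in candidates(key)]
--     out = []
--     while xs:
--         head = xs[0]
--         out.append(head)
--         xs = [y for y in xs[1:] if y != head]
--     return out
-- ===== Notes on version B (the rewrite author's own statement) =====
-- stated objective: alternative
-- what changed: B first expands every key into its candidate strings via a flat-map comprehension (stripped key plus basename), then deduplicates with a filter-based nub: repeatedly take the head and filter all its later copies out of the remainder, instead of A's append-loop followed by dict.fromkeys.
import Mathlib
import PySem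

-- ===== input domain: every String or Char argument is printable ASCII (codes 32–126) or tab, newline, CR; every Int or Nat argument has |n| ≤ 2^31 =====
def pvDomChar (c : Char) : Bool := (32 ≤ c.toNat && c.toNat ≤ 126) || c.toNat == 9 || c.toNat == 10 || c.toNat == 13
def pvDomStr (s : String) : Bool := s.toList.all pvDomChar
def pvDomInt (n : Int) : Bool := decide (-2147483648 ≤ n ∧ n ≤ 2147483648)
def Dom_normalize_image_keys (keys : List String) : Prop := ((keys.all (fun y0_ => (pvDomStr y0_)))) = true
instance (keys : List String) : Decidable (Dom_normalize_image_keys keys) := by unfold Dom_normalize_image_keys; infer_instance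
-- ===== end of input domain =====

-- B expands each key into its candidate strings with a flat-map and deduplicates with a
-- recursive filter-based nub, instead of A's append-loop followed by dict.fromkeys. Objective: alternative.


-- ===== PORT A =====
-- A: build `normalized` (k, and its basename when k contains '/'), then list(dict.fromkeys(...)).
def normalize_image_keys (keys : List String) : List String :=
  let normalized := keys.foldl (fun acc key =>
    if key = "" then acc
    else
      let k := PySem.Str.strip key
      if k = "" then acc
      else
        let acc1 := acc ++ [k]
        if PySem.Str.isIn "/" k then
          acc1 ++ [(((PySem.Str.split? k "/").getD []).getLast?).getD ""]  -- k.split("/")[-1]; split is never empty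
        else acc1) []
  PySem.List.dedup normalized

-- ===== PORT B =====
-- B helper `candidates(key)`: the list of strings a key contributes.
def pvCandidates (key : String) : List String :=
  if key = "" then []
  else
    let k := PySem.Str.strip key
    if k = "" then []
    else if PySem.Str.isIn "/" k then
      [k, (((PySem.Str.split? k "/").getD []).getLast?).getD ""]  -- k.split("/")[-1]
    else [k]

-- B helper: the while-loop nub — emit the head, continue on the tail with all copies of the head filtered out.
def pvNub (xs : List String) : List String :=
  match xs with
  | [] => []
  | x :: rest => x :: pvNub (rest.filter (fun y => y != x))
termination_by xs.length
decreasing_by simpa using Nat.lt_succ_of_le (List.length_filter_le _ rest)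

def normalize_image_keys_alt (keys : List String) : List String :=
  pvNub (keys.flatMap pvCandidates)

-- ===== PRECONDITION & SPEC =====
def Spec_normalize_image_keys (keys : List String) (out : List String) : Prop := out = normalize_image_keys_alt keys
instance (keys : List String) (out : List String) : Decidable (Spec_normalize_image_keys keys out) := by unfold Spec_normalize_image_keys; infer_instance

-- ===== CLAIM (what is proved, stated in full; the proofs are below) =====
def Claim_equal_normalize_image_keys : Prop := ∀ (keys : List String), Dom_normalize_image_keys keys → Spec_normalize_image_keys keys (normalize_image_keys keys)

-- ===== LEMMAS AND PROOFS =====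

-- A's loop body appends exactly pvCandidates of the key.
lemma foldlA_eq_flatMap (keys : List String) :
    keys.foldl (fun acc key =>
      if key = "" then acc
      else
        let k := PySem.Str.strip key
        if k = "" then acc
        else
          let acc1 := acc ++ [k]
          if PySem.Str.isIn "/" k then
            acc1 ++ [(((PySem.Str.split? k "/").getD []).getLast?).getD ""]
          else acc1) []
    = keys.flatMap pvCandidates := by
  have hbody : (fun (acc : List String) key =>
      if key = "" then acc
      else
        let k := PySem.Str.strip key
        if k = "" then acc
        else
          let acc1 := acc ++ [k]
          if PySem.Str.isIn "/" k then
            acc1 ++ [(((PySem.Str.split? k "/").getD []).getLast?).getD ""]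
          else acc1)
      = (fun acc key => acc ++ pvCandidates key) := by
    funext acc key
    simp only [pvCandidates]
    split_ifs <;> simp
  rw [hbody, PySem.List.foldl_append_eq_flatMap]
  simp

-- Set.ofList's fold, started from any accumulator, is that accumulator followed by
-- the filter-based nub of the not-yet-seen elements.
lemma pvNub_cons (x : String) (l : List String) :
    pvNub (x :: l) = x :: pvNub (l.filter (fun y => y != x)) := by
  rw [pvNub]

lemma ofList_fold_eq_nub (xs : List String) : ∀ (acc : List String),
    List.foldl PySem.Set.add acc xs
      = acc ++ pvNub (xs.filter (fun y => !acc.contains y)) := by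
  induction xs with
  | nil => intro acc; simp [pvNub]
  | cons x rest ih =>
    intro acc
    by_cases hx : acc.contains x = true
    · simp only [List.foldl_cons, PySem.Set.add, PySem.Set.contains, hx, if_pos,
        List.filter_cons, Bool.not_true]
      rw [ih acc]
      simp
    · have hx' : acc.contains x = false := by simpa using hx
      have hmem : x ∉ acc := by simpa using hx'
      have hbeq : ∀ y : String, (y == x) = decide (y = x) := by
        intro y
        rcases eq_or_ne y x with h | h <;> simp [h]
      simp only [List.foldl_cons, PySem.Set.add, PySem.Set.contains, hx', Bool.false_eq_true,
        if_false]
      rw [ih (acc ++ [x])]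
      have hfilter : rest.filter (fun y => !(acc ++ [x]).contains y)
          = (rest.filter (fun y => !acc.contains y)).filter (fun y => y != x) := by
        rw [List.filter_filter]
        apply List.filter_congr
        intro y _
        simp [Bool.not_or, Bool.and_comm, bne, hbeq y]
      rw [hfilter]
      simp [hmem, pvNub_cons, List.filter_filter]

lemma dedup_eq_nub (xs : List String) : PySem.List.dedup xs = pvNub xs := by
  rw [PySem.List.dedup_eq_ofList]
  show List.foldl PySem.Set.add PySem.Set.empty xs = pvNub xs
  rw [show (PySem.Set.empty : List String) = [] from rfl, ofList_fold_eq_nub xs []]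
  simp

-- ===== VERDICT (by name: the statement is the Claim_ definition above) =====
theorem normalize_image_keys_spec : Claim_equal_normalize_image_keys := by
  intro keys _
  unfold Spec_normalize_image_keys normalize_image_keys normalize_image_keys_alt
  rw [foldlA_eq_flatMap, dedup_eq_nub]
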